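-- pv_equiv track=rewrite | github.com/gherrick0918/grimbrain | grimbrain/engine/journal.py | export_journal_md
-- ===== SOURCE A (Python) =====
-- from typing import Any, Dict, Iterable, List
--
-- def _compact_line(entry: Dict[str, Any]) -> str:
--     """Render a single journal entry as a compact one-liner."""
--
--     day = entry.get("day")
--     when = entry.get("time")
--     loc = entry.get("loc")
--     kind = entry.get("kind", "info")
--     text = entry.get("text", "")
--     return f"[Day {day} {when} @ {loc}] ({kind}) {text}"
--
-- def export_journal_md(entries: Iterable[Dict[str, Any]]) -> str:
--     """Export the journal as Markdown grouped by day."""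
--
--     grouped: Dict[int, List[Dict[str, Any]]] = {}
--     for entry in entries:
--         day = int(entry.get("day", 0))
--         grouped.setdefault(day, []).append(entry)
--
--     parts: List[str] = ["# Adventure Journal"]
--     for day in sorted(grouped.keys()):
--         parts.append("\n## Day {day}".format(day=day))
--         for entry in grouped[day]:
--             parts.append(f"- {_compact_line(entry)}")
--     parts.append("")
--     return "\n".join(parts)
-- ===== SOURCE B (Python) =====
-- from typing import Any, Dict, Iterable, List
--
-- def _compact_line(entry: Dict[str, Any]) -> str:
--     day = entry.get("day")
--     when = entry.get("time")
--     loc = entry.get("loc")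
--     kind = entry.get("kind", "info")
--     text = entry.get("text", "")
--     return f"[Day {day} {when} @ {loc}] ({kind}) {text}"
--
-- def export_journal_md(entries: Iterable[Dict[str, Any]]) -> str:
--     """Export the journal as Markdown grouped by day (sorted distinct days + per-day filter; no dict index)."""
--     es = list(entries)
--     days = sorted({int(e.get("day", 0)) for e in es})
--     body = [s for d in days
--               for s in ["\n## Day %d" % d]
--                      + ["- " + _compact_line(e) for e in es if int(e.get("day", 0)) == d]]
--     return "\n".join(["# Adventure Journal"] + body + [""])
-- ===== Notes on version B (the rewrite author's own statement) =====
-- stated objective: alternative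
-- what changed: Replaces A's incremental dict-of-lists grouping (setdefault+append, then sorted keys indexing the dict) by computing the sorted set of distinct day numbers once and emitting each day's section with a per-day filter over the entry list in a single comprehension.
import Mathlib
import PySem

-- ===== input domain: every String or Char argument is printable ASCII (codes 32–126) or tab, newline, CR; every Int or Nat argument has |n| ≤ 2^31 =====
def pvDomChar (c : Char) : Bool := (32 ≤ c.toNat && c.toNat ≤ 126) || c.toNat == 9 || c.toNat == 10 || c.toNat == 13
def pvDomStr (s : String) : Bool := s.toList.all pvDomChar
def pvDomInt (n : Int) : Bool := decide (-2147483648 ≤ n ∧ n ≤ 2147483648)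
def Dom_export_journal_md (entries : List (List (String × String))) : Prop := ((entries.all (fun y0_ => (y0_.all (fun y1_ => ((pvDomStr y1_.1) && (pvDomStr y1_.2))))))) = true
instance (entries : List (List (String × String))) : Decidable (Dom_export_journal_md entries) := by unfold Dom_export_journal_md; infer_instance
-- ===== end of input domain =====

-- B groups by computing the sorted distinct day list once and filtering the entries per day,
-- instead of A's dict-of-lists accumulation indexed by sorted keys; same output, no speed claim.

-- ===== PORT A =====
-- shared renderer: Python's _compact_line (defined identically in both sources)
def pvOptStr : Option String → String
  | some s => s
  | none => "None"          -- f-string prints None as "None"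

def pvCompactLine (e : List (String × String)) : String :=
  let d := PySem.Dict.mk e
  "[Day " ++ pvOptStr (d.get? "day") ++ " " ++ pvOptStr (d.get? "time") ++ " @ " ++
    pvOptStr (d.get? "loc") ++ "] (" ++ d.getD "kind" "info" ++ ") " ++ d.getD "text" ""

-- int(entry.get("day", 0)); `.getD 0` is reached only outside Pre_ (where Python raises ValueError)
def pvDay (e : List (String × String)) : Int :=
  match PySem.Dict.get? (PySem.Dict.mk e) "day" with
  | some s => (PySem.Int.ofStr? s).getD 0
  | none => 0

def export_journal_md (entries : List (List (String × String))) : String :=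
  let grouped : PySem.Dict Int (List (List (String × String))) :=
    entries.foldl (fun g e => g.modify (pvDay e) [] (fun l => l ++ [e])) PySem.Dict.empty
  let parts : List String :=
    (PySem.List.sorted grouped.keys (fun x => x) false).foldl
      (fun parts d =>
        (grouped.getD d []).foldl (fun ps e => ps ++ ["- " ++ pvCompactLine e])
          (parts ++ ["\n## Day " ++ PySem.Int.toStr d]))
      ["# Adventure Journal"]
  PySem.Str.join "\n" (parts ++ [""])

-- ===== PORT B =====
def export_journal_md_alt (entries : List (List (String × String))) : String :=
  let days := PySem.List.sorted (PySem.Set.ofList (entries.map pvDay)) (fun x => x) false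
  let body := days.flatMap (fun d =>
    ("\n## Day " ++ PySem.Int.toStr d) ::
      (entries.filter (fun e => pvDay e == d)).map (fun e => "- " ++ pvCompactLine e))
  PySem.Str.join "\n" ("# Adventure Journal" :: body ++ [""])

-- ===== PRECONDITION & SPEC =====
-- Pre_: every present "day" value parses as a Python int; elsewhere A raises ValueError.
def Pre_export_journal_md (entries : List (List (String × String))) : Prop :=
  (entries.all (fun e =>
    match PySem.Dict.get? (PySem.Dict.mk e) "day" with
    | some s => (PySem.Int.ofStr? s).isSome
    | none => true)) = true
instance (entries : List (List (String × String))) : Decidable (Pre_export_journal_md entries) := by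
  unfold Pre_export_journal_md; infer_instance

def pvWitness_export_journal_md : (List (List (String × String))) :=
  [[("day", "1"), ("text", "met the hermit")], [("day", " 2 "), ("kind", "combat")], [("text", "no day")]]

def Spec_export_journal_md (entries : List (List (String × String))) (out : String) : Prop := out = export_journal_md_alt entries
instance (entries : List (List (String × String))) (out : String) : Decidable (Spec_export_journal_md entries out) := by unfold Spec_export_journal_md; infer_instance

-- ===== CLAIM (what is proved, stated in full; the proofs are below) =====
def Claim_equal_export_journal_md : Prop := ∀ (entries : List (List (String × String))), Dom_export_journal_md entries → Pre_export_journal_md entries → Spec_export_journal_md entries (export_journal_md entries)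

-- ===== LEMMAS AND PROOFS =====

-- A's grouping dict, looked up at any day d, is the per-day filter of the entries.
theorem pv_getD_grouped (entries : List (List (String × String))) (d : Int) :
    (entries.foldl (fun g e => g.modify (pvDay e) [] (fun l => l ++ [e]))
      (PySem.Dict.empty : PySem.Dict Int (List (List (String × String))))).getD d []
      = entries.filter (fun e => pvDay e == d) := by
  have h : (entries.map (fun e => (pvDay e, e))).foldl
        (fun (g : PySem.Dict Int (List (List (String × String)))) p => g.modify p.1 [] (fun l => l ++ [p.2]))
        PySem.Dict.empty
      = entries.foldl (fun g e => g.modify (pvDay e) [] (fun l => l ++ [e])) PySem.Dict.empty :=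
    List.foldl_map
  rw [← h, PySem.Dict.getD_foldl_modify_append, PySem.Dict.getD_empty, List.filter_map,
    List.map_map]
  simp [Function.comp_def]

-- A's grouping dict has keys = the distinct day list, first occurrences in order.
theorem pv_keys_grouped (entries : List (List (String × String))) :
    (entries.foldl (fun g e => g.modify (pvDay e) [] (fun l => l ++ [e]))
      (PySem.Dict.empty : PySem.Dict Int (List (List (String × String))))).keys
      = PySem.Set.ofList (entries.map pvDay) := by
  rw [PySem.Dict.keys_foldl_modify_key]
  simp [PySem.Set.update, PySem.Set.ofList_eq_foldl, PySem.Dict.keys_empty]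

-- A's nested append loop over a day list is the flatMap B builds.
theorem pv_parts_loop (days : List Int) (g : Int → List (List (String × String))) (acc : List String) :
    days.foldl
      (fun parts d =>
        (g d).foldl (fun ps e => ps ++ ["- " ++ pvCompactLine e])
          (parts ++ ["\n## Day " ++ PySem.Int.toStr d])) acc
      = acc ++ days.flatMap (fun d =>
          ("\n## Day " ++ PySem.Int.toStr d) :: (g d).map (fun e => "- " ++ pvCompactLine e)) := by
  induction days generalizing acc with
  | nil => simp
  | cons d rest ih =>
    rw [List.foldl_cons, PySem.List.foldl_append_singleton_eq_map, ih, List.flatMap_cons]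
    simp [List.append_assoc]

-- ===== VERDICT (by name: the statement is the Claim_ definition above) =====
theorem export_journal_md_spec : Claim_equal_export_journal_md := by
  intro entries _ _
  unfold Spec_export_journal_md
  simp only [export_journal_md, export_journal_md_alt, pv_getD_grouped, pv_keys_grouped,
    pv_parts_loop]
  simp
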